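-- pv_equiv track=rewrite | github.com/dtote/Kyber-API | kypher.py | Parse
-- ===== SOURCE A (Python) =====
-- def Parse(b):
--   """
--   Función para cambiar de representación entre bytes y coeficientes de Zq[x]. (Parse)
--   Input: Conjunto de bytes arbitrario.
--   Output: Coeficientes de Zq[x] que se interpretará como un elemento en el dominio NTT. (biyectivo)
--   """
--   i, j, n, q = 0, 0, 256, 3329
--   a=n*[0] # Serán nuestros coeficientes de Zq.
--
--   while j<n and i+3<len(b): #Por si el tamaño de bytes es pequeño.
--     d1= b[i]+256*(b[i+1]%16)
--     d2=(b[i+1]//16)+16*b[i+2]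
--
--     if d1<q:
--       a[j]=d1
--       j=j+1
--     if d2<q and j<n:
--       a[j]=d2
--       j=j+1
--     i=i+3
--   return [int(elemento) for elemento in a]
-- ===== SOURCE B (Python) =====
-- def Parse(b):
--     q = 3329
--     limit = len(b) - 3
--
--     def cand(t):
--         # t-th element of the 12-bit candidate stream (two per 3-byte block)
--         i = 3 * (t // 2)
--         if t % 2 == 0:
--             return b[i] + 256 * (b[i + 1] % 16)
--         return b[i + 1] // 16 + 16 * b[i + 2]
--
--     def collect(t, need):
--         # emit the next accepted candidate, recursing on how many are still needed;
--         # the zero padding is the base case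
--         if need == 0:
--             return []
--         while 3 * (t // 2) < limit and cand(t) >= q:
--             t += 1
--         if 3 * (t // 2) >= limit:
--             return [0] * need
--         return [cand(t)] + collect(t + 1, need - 1)
--
--     return collect(0, 256)
-- ===== Notes on version B (the rewrite author's own statement) =====
-- stated objective: alternative
-- what changed: A interleaves rejection tests with writes into a preallocated mutable 256-array under a while with two counters; B views the bytes as a flat stream of 12-bit candidates indexed by t, iteratively skips rejected candidates, and recurses on the number of coefficients still needed, the zero padding arising as the base case.
import Mathlib
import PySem

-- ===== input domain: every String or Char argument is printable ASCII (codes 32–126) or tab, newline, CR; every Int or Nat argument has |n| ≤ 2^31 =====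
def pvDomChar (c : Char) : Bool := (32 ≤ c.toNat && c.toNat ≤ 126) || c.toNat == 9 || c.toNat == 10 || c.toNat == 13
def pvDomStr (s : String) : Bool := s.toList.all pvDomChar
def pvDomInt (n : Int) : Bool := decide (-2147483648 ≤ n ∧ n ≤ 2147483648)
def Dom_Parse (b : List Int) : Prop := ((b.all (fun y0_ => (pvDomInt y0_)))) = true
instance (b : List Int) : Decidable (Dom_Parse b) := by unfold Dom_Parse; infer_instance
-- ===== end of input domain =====

-- B replaces A's interleaved while-loop writing into a preallocated 256-array with a flat
-- 12-bit candidate stream, an iterative skip of rejected candidates, and recursion on the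
-- number of coefficients still needed (objective: alternative, same cost).

-- ===== PORT A =====
-- the while-loop of A: state i, j and the mutable array a; the guard makes every index access in range,
-- so b.getD k 0 is exactly Python's b[k] here
def parseLoopA (b : List Int) (i j : Nat) (a : List Int) : List Int :=
  if h : j < 256 ∧ i + 3 < b.length then
    let d1 := b.getD i 0 + 256 * PySem.Int.mod (b.getD (i+1) 0) 16
    let d2 := PySem.Int.floordiv (b.getD (i+1) 0) 16 + 16 * b.getD (i+2) 0
    -- the two sequential 'if' updates of A, sequenced explicitly
    if d1 < 3329 then
      if d2 < 3329 ∧ j + 1 < 256 then parseLoopA b (i+3) (j+2) ((a.set j d1).set (j+1) d2)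
      else parseLoopA b (i+3) (j+1) (a.set j d1)
    else
      if d2 < 3329 ∧ j < 256 then parseLoopA b (i+3) (j+1) (a.set j d2)
      else parseLoopA b (i+3) j a
  else a
termination_by b.length - i
decreasing_by all_goals omega

def Parse (b : List Int) : List Int :=
  -- final [int(elemento) for elemento in a] is the identity on ints
  (parseLoopA b 0 0 (List.replicate 256 0)).map id

-- ===== PORT B =====
-- Source B's cand(t): the t-th element of the 12-bit candidate stream; only evaluated under the
-- range guard 3*(t//2) < len(b)-3, so b.getD k 0 is exactly Python's b[k] here
def candB (b : List Int) (t : Nat) : Int :=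
  let i := 3 * (t / 2)
  if t % 2 = 0 then b.getD i 0 + 256 * PySem.Int.mod (b.getD (i+1) 0) 16
  else PySem.Int.floordiv (b.getD (i+1) 0) 16 + 16 * b.getD (i+2) 0

-- Source B's inner 'while' skipping rejected candidates (guard 3*(t//2) < len(b)-3 transcribed
-- on Nat as 3*(t/2)+3 < len(b), the same inequality since both sides are nonnegative there)
def skipB (b : List Int) (t : Nat) : Nat :=
  if 3 * (t / 2) + 3 < b.length ∧ ¬ candB b t < 3329 then skipB b (t+1) else t
termination_by b.length - t
decreasing_by omega

-- Source B's collect(t, need)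
def collectB (b : List Int) (t : Nat) (need : Nat) : List Int :=
  match need with
  | 0 => []
  | need' + 1 =>
    let t' := skipB b t
    if 3 * (t' / 2) + 3 < b.length then
      candB b t' :: collectB b (t'+1) need'
    else List.replicate (need' + 1) 0

def Parse_alt (b : List Int) : List Int := collectB b 0 256

-- ===== PRECONDITION & SPEC =====
def Spec_Parse (b : List Int) (out : List Int) : Prop := out = Parse_alt b
instance (b : List Int) (out : List Int) : Decidable (Spec_Parse b out) := by unfold Spec_Parse; infer_instance

-- ===== CLAIM (what is proved, stated in full; the proofs are below) =====
def Claim_equal_Parse : Prop := ∀ (b : List Int), Dom_Parse b → Spec_Parse b (Parse b)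

-- ===== LEMMAS AND PROOFS =====

-- the list of all accepted candidates generated from block index i on
def gen (b : List Int) (i : Nat) : List Int :=
  if i + 3 < b.length then
    let d1 := b.getD i 0 + 256 * PySem.Int.mod (b.getD (i+1) 0) 16
    let d2 := PySem.Int.floordiv (b.getD (i+1) 0) 16 + 16 * b.getD (i+2) 0
    (if d1 < 3329 then [d1] else []) ++ (if d2 < 3329 then [d2] else []) ++ gen b (i+3)
  else []
termination_by b.length - i
decreasing_by omega

-- the accepted candidates of the stream from candidate index t on
def genT (b : List Int) (t : Nat) : List Int :=
  if 3 * (t / 2) + 3 < b.length then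
    (if candB b t < 3329 then [candB b t] else []) ++ genT b (t+1)
  else []
termination_by b.length - t
decreasing_by
  rename_i h
  have : t < b.length := by omega
  omega

def padded (l : List Int) : List Int := l.take 256 ++ List.replicate (256 - l.length) 0

theorem padded_of_full (l m : List Int) (h : l.length = 256) : padded (l ++ m) = l := by
  have h1 : (l ++ m).take 256 = l := by rw [← h]; exact List.take_left
  have h2 : 256 - (l ++ m).length = 0 := by simp; omega
  unfold padded
  rw [h1, h2]
  simp

theorem padded_drop_tail (l m m' : List Int) (h : l.length = 256) :
    padded (l ++ m) = padded (l ++ m') := by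
  rw [padded_of_full _ _ h, padded_of_full _ _ h]

theorem padded_of_le (l : List Int) (h : l.length ≤ 256) :
    padded l = l ++ List.replicate (256 - l.length) 0 := by
  simp [padded, List.take_of_length_le h]

theorem set_len_append (pre tail : List Int) (x y : Int) :
    (pre ++ y :: tail).set pre.length x = pre ++ x :: tail := by
  induction pre with
  | nil => simp
  | cons a pre ih => simp [ih]

theorem replicate_split (j : Nat) (h : j < 256) :
    List.replicate (256 - j) (0 : Int) = 0 :: List.replicate (256 - (j+1)) 0 := by
  have : 256 - j = (256 - (j+1)) + 1 := by omega
  rw [this, List.replicate_succ]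

-- A-side characterisation: the loop fills the zero tail with the first accepted candidates
theorem parseLoopA_eq (b : List Int) (i j : Nat) (pre : List Int)
    (hlen : pre.length = j) (hj : j ≤ 256) :
    parseLoopA b i j (pre ++ List.replicate (256 - j) 0) = padded (pre ++ gen b i) := by
  by_cases hg : j < 256 ∧ i + 3 < b.length
  · obtain ⟨hj256, hi⟩ := hg
    have hrec := parseLoopA_eq b (i+3)
    rw [parseLoopA, gen]
    rw [dif_pos ⟨hj256, hi⟩, if_pos hi]
    set d1 := b.getD i 0 + 256 * PySem.Int.mod (b.getD (i+1) 0) 16 with hd1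
    set d2 := PySem.Int.floordiv (b.getD (i+1) 0) 16 + 16 * b.getD (i+2) 0 with hd2
    have hsplit := replicate_split j hj256
    by_cases h1 : d1 < 3329
    · rw [if_pos h1]
      have hset1 : (pre ++ List.replicate (256 - j) 0).set j d1
          = (pre ++ [d1]) ++ List.replicate (256 - (j+1)) 0 := by
        rw [hsplit, ← hlen, set_len_append]; simp
      by_cases h2 : d2 < 3329
      · by_cases hj1 : j + 1 < 256
        · rw [if_pos ⟨h2, hj1⟩, hset1]
          have hlen2 : (pre ++ [d1]).length = j + 1 := by simp [hlen]
          have hset2 : ((pre ++ [d1]) ++ List.replicate (256 - (j+1)) 0).set (j+1) d2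
              = ((pre ++ [d1]) ++ [d2]) ++ List.replicate (256 - ((j+1)+1)) 0 := by
            rw [replicate_split (j+1) hj1, ← hlen2, set_len_append]; simp
          rw [hset2]
          have e : (j+1)+1 = j+2 := rfl
          rw [e] at hset2 ⊢
          have := hrec (j+2) ((pre ++ [d1]) ++ [d2]) (by simp [hlen]) (by omega)
          rw [this]
          simp [if_pos h1, if_pos h2]
        · -- j+1 = 256: d2 is dropped by A, but padded truncates it anyway
          rw [if_neg (by omega : ¬(d2 < 3329 ∧ j + 1 < 256)), hset1]
          have := hrec (j+1) (pre ++ [d1]) (by simp [hlen]) (by omega)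
          rw [this]
          have hfull : (pre ++ [d1]).length = 256 := by simp [hlen]; omega
          rw [show pre ++ ((if d1 < 3329 then [d1] else []) ++ (if d2 < 3329 then [d2] else []) ++ gen b (i+3))
              = (pre ++ [d1]) ++ ((if d2 < 3329 then [d2] else []) ++ gen b (i+3)) by simp [if_pos h1]]
          exact padded_drop_tail (pre ++ [d1]) _ _ hfull
      · rw [if_neg (by tauto : ¬(d2 < 3329 ∧ j + 1 < 256)), hset1]
        have := hrec (j+1) (pre ++ [d1]) (by simp [hlen]) (by omega)
        rw [this]
        simp [if_pos h1, if_neg h2]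
    · rw [if_neg h1]
      by_cases h2 : d2 < 3329
      · rw [if_pos ⟨h2, hj256⟩]
        have hset1 : (pre ++ List.replicate (256 - j) 0).set j d2
            = (pre ++ [d2]) ++ List.replicate (256 - (j+1)) 0 := by
          rw [hsplit, ← hlen, set_len_append]; simp
        rw [hset1]
        have := hrec (j+1) (pre ++ [d2]) (by simp [hlen]) (by omega)
        rw [this]
        simp [if_neg h1, if_pos h2]
      · rw [if_neg (by tauto : ¬(d2 < 3329 ∧ j < 256))]
        have := hrec j pre hlen hj
        rw [this]
        simp [if_neg h1, if_neg h2]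
  · rw [parseLoopA, dif_neg hg, gen]
    rcases Nat.lt_or_ge j 256 with hlt | hge
    · have hni : ¬ i + 3 < b.length := by tauto
      rw [if_neg hni]
      rw [padded_of_le _ (by simp [hlen]; omega)]
      simp [hlen]
    · have hj' : j = 256 := by omega
      subst hj'
      have h0 : (256 : Nat) - 256 = 0 := by omega
      rw [h0]
      simp only [List.replicate_zero, List.append_nil]
      split
      · exact (padded_of_full pre _ hlen).symm
      · simp only [List.append_nil]
        rw [padded_of_le _ (by omega : pre.length ≤ 256)]
        simp [hlen]
termination_by b.length - i
decreasing_by all_goals omega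

-- the candidate stream read two at a time is exactly A's per-block pair (d1, d2)
theorem genT_even (b : List Int) (k : Nat) : genT b (2*k) = gen b (3*k) := by
  have e1 : (2*k)/2 = k := by omega
  have e2 : (2*k+1)/2 = k := by omega
  have em1 : (2*k) % 2 = 0 := by omega
  have em2 : (2*k+1) % 2 = 1 := by omega
  by_cases h : 3*k + 3 < b.length
  · have hc1 : candB b (2*k) = b.getD (3*k) 0 + 256 * PySem.Int.mod (b.getD (3*k+1) 0) 16 := by
      simp [candB, e1, em1]
    have hc2 : candB b (2*k+1)
        = PySem.Int.floordiv (b.getD (3*k+1) 0) 16 + 16 * b.getD (3*k+2) 0 := by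
      simp [candB, e2, em2]
    have hnext : genT b (2*k+1+1) = gen b (3*k+3) := by
      have ha : 2*k+1+1 = 2*(k+1) := by ring
      have hb : 3*(k+1) = 3*k+3 := by ring
      rw [ha, genT_even b (k+1), hb]
    rw [genT, e1, if_pos h, genT, e2, if_pos h, hc1, hc2, hnext]
    conv_rhs => rw [gen]
    rw [if_pos h]
    simp [List.append_assoc]
  · rw [genT, e1, if_neg h, gen, if_neg h]
termination_by b.length - 3*k
decreasing_by omega

-- the skip loop walks over rejected candidates only: the accepted stream is unchanged
theorem genT_skipB (b : List Int) (t : Nat) : genT b (skipB b t) = genT b t := by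
  rw [skipB]
  split
  · rename_i h
    have hstep : genT b t = genT b (t+1) := by
      rw [genT, if_pos h.1, if_neg h.2]
      simp
    rw [genT_skipB b (t+1), hstep]
  · rfl
termination_by b.length - t
decreasing_by omega

-- after the skip loop, the next in-range candidate is accepted
theorem skipB_stop (b : List Int) (t : Nat) :
    3 * (skipB b t / 2) + 3 < b.length → candB b (skipB b t) < 3329 := by
  rw [skipB]
  split
  · exact skipB_stop b (t+1)
  · rename_i h
    intro hr
    by_contra hc
    exact h ⟨hr, hc⟩
termination_by b.length - t
decreasing_by omega

def padTo (need : Nat) (l : List Int) : List Int :=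
  l.take need ++ List.replicate (need - l.length) 0

-- B-side characterisation: collect emits the accepted stream truncated/padded to 'need'
theorem collectB_eq (b : List Int) (t : Nat) (need : Nat) :
    collectB b t need = padTo need (genT b t) := by
  induction need generalizing t with
  | zero => simp [collectB, padTo]
  | succ n ih =>
    simp only [collectB]
    have hstream : genT b t = genT b (skipB b t) := (genT_skipB b t).symm
    by_cases h : 3 * (skipB b t / 2) + 3 < b.length
    · rw [if_pos h]
      have hacc := skipB_stop b t h
      have hhead : genT b (skipB b t) = candB b (skipB b t) :: genT b (skipB b t + 1) := by
        rw [genT, if_pos h, if_pos hacc]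
        simp
      rw [ih (skipB b t + 1), hstream, hhead]
      simp [padTo]
    · rw [if_neg h]
      have hnil : genT b (skipB b t) = [] := by rw [genT, if_neg h]
      rw [hstream, hnil]
      simp [padTo]

theorem Parse_alt_eq_padded (b : List Int) : Parse_alt b = padded (gen b 0) := by
  unfold Parse_alt
  rw [collectB_eq b 0 256]
  have h0 : genT b 0 = gen b 0 := by
    have := genT_even b 0
    simpa using this
  rw [h0]
  rfl

-- ===== VERDICT (by name: the statement is the Claim_ definition above) =====
theorem Parse_spec : Claim_equal_Parse := by
  intro b _
  unfold Spec_Parse Parse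
  rw [List.map_id, Parse_alt_eq_padded]
  have h := parseLoopA_eq b 0 0 [] rfl (by omega)
  simp only [List.nil_append, Nat.sub_zero] at h
  exact h
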